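-- pv_equiv track=rewrite | github.com/liqiming-whu/rna_structures_prediction | rna_prediction/src/parsing/txt_parser.py | getsamples
-- ===== SOURCE A (Python) =====
-- def getsamples(f, numbers):
--     # f: filename
--     # number: indices of samples
--
--     numbers = [n * 5 for n in numbers]  # samples take up five lines each
--     data = []
--
--     for i, line in enumerate(f):
--         if i - 1 in numbers:
--             sequence = line.rstrip().split(' ')
--             sample = [sequence]
--         if i - 2 in numbers:
--             structure = line.rstrip().split(' ')
--             sample.append(structure)
--         if i - 3 in numbers:
--             state = line.rstrip().split(' ')
--             sample.append(state)
--             data.append(sample)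
--
--     return data  # returns list of samples, sample is [sequence, structure, state]
-- ===== SOURCE B (Python) =====
-- def getsamples(f, numbers):
--     lines = list(f)
--     data = []
--     for t in sorted(set(n * 5 for n in numbers)):
--         if 0 <= t and t + 3 < len(lines):
--             data.append([lines[t + 1].rstrip().split(' '),
--                          lines[t + 2].rstrip().split(' '),
--                          lines[t + 3].rstrip().split(' ')])
--     return data
-- ===== Notes on version B (the rewrite author's own statement) =====
-- stated objective: faster
-- what changed: Replaces A's enumerate scan with three list-membership tests per line (carrying a partial 'sample' state) by computing sorted(set(n*5)) block starts once and directly indexing the three lines of each fully-present block.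
import Mathlib
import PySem

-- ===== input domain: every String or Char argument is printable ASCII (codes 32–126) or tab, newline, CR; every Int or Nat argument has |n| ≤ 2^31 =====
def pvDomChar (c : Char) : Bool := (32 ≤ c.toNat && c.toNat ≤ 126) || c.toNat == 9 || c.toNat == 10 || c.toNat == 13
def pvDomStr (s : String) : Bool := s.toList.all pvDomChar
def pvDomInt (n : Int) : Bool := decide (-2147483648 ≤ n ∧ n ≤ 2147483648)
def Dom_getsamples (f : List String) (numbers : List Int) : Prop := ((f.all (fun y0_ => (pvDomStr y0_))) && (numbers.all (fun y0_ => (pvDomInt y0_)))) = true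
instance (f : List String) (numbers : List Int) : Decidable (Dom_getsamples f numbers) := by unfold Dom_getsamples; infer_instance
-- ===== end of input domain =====

-- B replaces A's enumerate scan (three list-membership tests per line, carrying a
-- partial sample) with sorted(set(n*5)) block starts indexed directly; faster per the
-- timing run.

-- line.rstrip().split(' ') — split? is some for the nonempty separator ' ', so getD [] is exact
def pvProc (line : String) : List String :=
  (PySem.Str.split? (PySem.Str.rstrip line) " ").getD []

-- ===== PORT A =====
def getsamples (f : List String) (numbers : List Int) : List (List (List String)) :=
  let nums := numbers.map (fun n => n * 5)
  -- sample starts Python-unbound; [] stands for the unbound state (never read before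
  -- assignment, since nums holds only multiples of 5)
  (((PySem.List.enumerate f).foldl
      (fun (acc : List (List (List String)) × List (List String)) p =>
        let sample := if p.1 - 1 ∈ nums then [pvProc p.2] else acc.2
        let sample := if p.1 - 2 ∈ nums then sample ++ [pvProc p.2] else sample
        if p.1 - 3 ∈ nums then (acc.1 ++ [sample ++ [pvProc p.2]], sample ++ [pvProc p.2])
        else (acc.1, sample))
      ([], [])).1)

-- ===== PORT B =====
def getsamples_alt (f : List String) (numbers : List Int) : List (List (List String)) :=
  let targets := PySem.List.sorted (PySem.Set.ofList (numbers.map (fun n => n * 5))) (fun x => x)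
  targets.foldl
    (fun data t =>
      if 0 ≤ t ∧ t + 3 < (f.length : Int) then
        data ++ [[pvProc (PySem.List.pyGetD f (t + 1) ""),
                  pvProc (PySem.List.pyGetD f (t + 2) ""),
                  pvProc (PySem.List.pyGetD f (t + 3) "")]]
      else data)
    []

-- ===== PRECONDITION & SPEC =====
def Spec_getsamples (f : List String) (numbers : List Int) (out : List (List (List String))) : Prop := out = getsamples_alt f numbers
instance (f : List String) (numbers : List Int) (out : List (List (List String))) : Decidable (Spec_getsamples f numbers out) := by unfold Spec_getsamples; infer_instance

-- ===== CLAIM (what is proved, stated in full; the proofs are below) =====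
def Claim_equal_getsamples : Prop := ∀ (f : List String) (numbers : List Int), Dom_getsamples f numbers → Spec_getsamples f numbers (getsamples f numbers)

-- ===== LEMMAS AND PROOFS =====

-- the block appended by A at loop index i (its target is i-3)
def pvBlk (f : List String) (i : Nat) : List (List String) :=
  [pvProc (f.getD (i - 2) ""), pvProc (f.getD (i - 1) ""), pvProc (f.getD i "")]

-- the block B reads for target t
def pvBlkT (f : List String) (t : Int) : List (List String) :=
  [pvProc (PySem.List.pyGetD f (t + 1) ""),
   pvProc (PySem.List.pyGetD f (t + 2) ""),
   pvProc (PySem.List.pyGetD f (t + 3) "")]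

-- what A's loop emits from index i on
def pvOut (f : List String) (nums : List Int) (i : Nat) : List (List (List String)) :=
  if _h : i < f.length then
    (if (i : Int) - 3 ∈ nums then [pvBlk f i] else []) ++ pvOut f nums (i + 1)
  else []
termination_by f.length - i

def pvStep (nums : List Int) (acc : List (List (List String)) × List (List String))
    (p : Int × String) : List (List (List String)) × List (List String) :=
  let sample := if p.1 - 1 ∈ nums then [pvProc p.2] else acc.2
  let sample := if p.1 - 2 ∈ nums then sample ++ [pvProc p.2] else sample
  if p.1 - 3 ∈ nums then (acc.1 ++ [sample ++ [pvProc p.2]], sample ++ [pvProc p.2])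
  else (acc.1, sample)

lemma pvA_loop (f : List String) (nums : List Int) (hmul : ∀ m ∈ nums, (5 : Int) ∣ m) :
    ∀ (n i : Nat), f.length - i = n → i ≤ f.length →
    ∀ (data : List (List (List String))) (sample : List (List String)),
    ((i : Int) - 2 ∈ nums → sample = [pvProc (f.getD (i - 1) "")]) →
    ((i : Int) - 3 ∈ nums → sample = [pvProc (f.getD (i - 2) ""), pvProc (f.getD (i - 1) "")]) →
    ((PySem.List.enumerate (f.drop i) i).foldl (pvStep nums) (data, sample)).1
      = data ++ pvOut f nums i := by
  intro n
  induction n with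
  | zero =>
    intro i hn hi data sample _ _
    have hlen : i = f.length := by omega
    rw [pvOut]
    simp [hlen]
  | succ n ih =>
    intro i hn hi data sample h2 h3
    have hlt : i < f.length := by omega
    rw [List.drop_eq_getElem_cons hlt, PySem.List.enumerate_cons]
    rw [List.foldl_cons]
    -- evaluate one step
    have hstep : pvStep nums (data, sample) ((i : Int), f[i]) =
        ((if (i:Int) - 3 ∈ nums then data ++ [pvBlk f i] else data),
         (if (i:Int) - 1 ∈ nums then [pvProc f[i]]
          else if (i:Int) - 2 ∈ nums then sample ++ [pvProc f[i]]
          else if (i:Int) - 3 ∈ nums then [pvProc (f.getD (i-2) ""), pvProc (f.getD (i-1) ""), pvProc f[i]]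
          else sample)) := by
      by_cases m1 : (i:Int) - 1 ∈ nums
      · have m2 : (i:Int) - 2 ∉ nums := fun h => by
          obtain ⟨a, ha⟩ := hmul _ m1; obtain ⟨b, hb⟩ := hmul _ h; omega
        have m3 : (i:Int) - 3 ∉ nums := fun h => by
          obtain ⟨a, ha⟩ := hmul _ m1; obtain ⟨b, hb⟩ := hmul _ h; omega
        simp [pvStep, m1, m2, m3]
      · by_cases m2 : (i:Int) - 2 ∈ nums
        · have m3 : (i:Int) - 3 ∉ nums := fun h => by
            obtain ⟨a, ha⟩ := hmul _ m2; obtain ⟨b, hb⟩ := hmul _ h; omega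
          simp [pvStep, m1, m2, m3, h2 m2]
        · by_cases m3 : (i:Int) - 3 ∈ nums
          · simp [pvStep, m1, m2, m3, h3 m3, pvBlk, List.getD_eq_getElem?_getD,
                  List.getElem?_eq_getElem hlt]
          · simp [pvStep, m1, m2, m3]
    rw [hstep]
    have hcast : (i : Int) + 1 = ((i + 1 : Nat) : Int) := by push_cast; ring
    rw [hcast]
    rw [ih (i + 1) (by omega) (by omega) _ _ ?h2' ?h3']
    case h2' =>
      intro hm
      have m1 : (i:Int) - 1 ∈ nums := by
        have : ((i + 1 : Nat) : Int) - 2 = (i:Int) - 1 := by push_cast; ring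
        rwa [this] at hm
      have geti : f.getD ((i + 1) - 1) "" = f[i] := by
        rw [show i + 1 - 1 = i from rfl, List.getD_eq_getElem?_getD,
            List.getElem?_eq_getElem hlt, Option.getD_some]
      rw [geti]
      simp only [m1, if_true]
    case h3' =>
      intro hm
      have m2 : (i:Int) - 2 ∈ nums := by
        have : ((i + 1 : Nat) : Int) - 3 = (i:Int) - 2 := by push_cast; ring
        rwa [this] at hm
      have m1 : (i:Int) - 1 ∉ nums := fun h => by
        obtain ⟨a, ha⟩ := hmul _ m2; obtain ⟨b, hb⟩ := hmul _ h; omega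
      have geti : f.getD ((i + 1) - 1) "" = f[i] := by
        rw [show i + 1 - 1 = i from rfl, List.getD_eq_getElem?_getD,
            List.getElem?_eq_getElem hlt, Option.getD_some]
      have geti1 : f.getD ((i + 1) - 2) "" = f.getD (i - 1) "" := by
        congr 1
      rw [geti, geti1]
      simp only [m1, if_false, m2, if_true]
      rw [h2 m2]
      rfl
    -- recombine data
    conv_rhs => rw [pvOut]
    simp only [hlt, dif_pos]
    by_cases m3 : (i:Int) - 3 ∈ nums <;> simp [m3, List.append_assoc]

-- splitting a strictly sorted filter at the unique window element
lemma pvFilter_window (S : List Int) (hS : S.Pairwise (· < ·)) (i len : Int) (hi : i < len) :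
    S.filter (fun t => decide (i ≤ t + 3 ∧ t + 3 < len)) =
      (if (i - 3) ∈ S then [i - 3] else [])
        ++ S.filter (fun t => decide (i + 1 ≤ t + 3 ∧ t + 3 < len)) := by
  induction S with
  | nil => simp
  | cons t S' ih =>
    have htl : ∀ u ∈ S', t < u := fun u hu => (List.pairwise_cons.mp hS).1 u hu
    have ih' := ih (List.pairwise_cons.mp hS).2
    rw [List.filter_cons, List.filter_cons]
    by_cases ht : t = i - 3
    · subst ht
      have hnot : (i - 3) ∉ S' := fun h => by have := htl _ h; omega
      have hp : decide (i ≤ (i - 3) + 3 ∧ (i - 3) + 3 < len) = true := by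
        simp only [decide_eq_true_eq]; omega
      have hq : decide (i + 1 ≤ (i - 3) + 3 ∧ (i - 3) + 3 < len) = false := by
        simp only [decide_eq_false_iff_not, not_and, not_lt]; omega
      rw [hp, hq, if_pos rfl, if_pos (List.mem_cons_self), if_neg (Bool.false_ne_true),
          List.singleton_append, List.cons_inj_right]
      apply List.filter_congr
      intro u hu
      have := htl _ hu
      simp only [decide_eq_decide]
      omega
    · have hpq : decide (i ≤ t + 3 ∧ t + 3 < len) = decide (i + 1 ≤ t + 3 ∧ t + 3 < len) := by
        simp only [decide_eq_decide]; omega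
      rw [hpq]
      by_cases hmem : (i - 3) ∈ S'
      · have hlt3 : t < i - 3 := htl _ hmem
        have hq : decide (i + 1 ≤ t + 3 ∧ t + 3 < len) = false := by
          simp only [decide_eq_false_iff_not, not_and, not_lt]; omega
        rw [hq, if_neg (Bool.false_ne_true), if_neg (Bool.false_ne_true),
            if_pos (List.mem_cons_of_mem t hmem), ih', if_pos hmem]
      · have hmemc : (i - 3) ∉ t :: S' := by
          intro h
          rcases List.mem_cons.mp h with h | h
          · exact ht h.symm
          · exact hmem h
        have hpf : S'.filter (fun t => decide (i ≤ t + 3 ∧ t + 3 < len)) =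
            S'.filter (fun t => decide (i + 1 ≤ t + 3 ∧ t + 3 < len)) := by
          simpa [hmem] using ih'
        rw [if_neg hmemc, List.nil_append, hpf]

lemma pvOut_eq (f : List String) (nums S : List Int)
    (hmul : ∀ m ∈ nums, (5 : Int) ∣ m)
    (hmem : ∀ t, t ∈ S ↔ t ∈ nums) (hS : S.Pairwise (· < ·)) :
    ∀ (n i : Nat), f.length - i = n →
    pvOut f nums i =
      (S.filter (fun t => decide ((i : Int) ≤ t + 3 ∧ t + 3 < (f.length : Int)))).map (pvBlkT f) := by
  intro n
  induction n with
  | zero =>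
    intro i hn
    rw [pvOut]
    have hge : f.length ≤ i := by omega
    have : S.filter (fun t => decide ((i : Int) ≤ t + 3 ∧ t + 3 < (f.length : Int))) = [] := by
      apply List.filter_eq_nil_iff.mpr
      intro t _
      simp only [decide_eq_true_eq]
      omega
    rw [this, List.map_nil, dif_neg (Nat.not_lt.mpr hge)]
  | succ n ih =>
    intro i hn
    have hlt : i < f.length := by omega
    rw [pvOut]
    simp only [hlt, dif_pos]
    rw [ih (i + 1) (by omega)]
    rw [pvFilter_window S hS (i : Int) (f.length : Int) (by exact_mod_cast hlt)]
    have hcast : ((i : Int) + 1) = ((i + 1 : Nat) : Int) := by push_cast; ring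
    rw [List.map_append, hcast]
    refine congrArg (· ++ _) ?_
    by_cases m3 : (i:Int) - 3 ∈ nums
    · have hSm : (i:Int) - 3 ∈ S := (hmem _).mpr m3
      have hge : (0:Int) ≤ (i:Int) - 3 := by
        obtain ⟨a, ha⟩ := hmul _ m3; omega
      rw [if_pos m3, if_pos hSm, List.map_cons, List.map_nil]
      have hblk : pvBlkT f ((i:Int) - 3) = pvBlk f i := by
        unfold pvBlk pvBlkT
        have e1 : (i:Int) - 3 + 1 = ((i - 2 : Nat) : Int) := by omega
        have e2 : (i:Int) - 3 + 2 = ((i - 1 : Nat) : Int) := by omega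
        have e3 : (i:Int) - 3 + 3 = ((i : Nat) : Int) := by omega
        rw [e1, e2, e3, PySem.List.pyGetD_natCast, PySem.List.pyGetD_natCast,
            PySem.List.pyGetD_natCast]
      rw [hblk]
    · have hSm : (i:Int) - 3 ∉ S := fun h => m3 ((hmem _).mp h)
      rw [if_neg m3, if_neg hSm, List.map_nil]

-- ===== VERDICT (by name: the statement is the Claim_ definition above) =====
theorem getsamples_spec : Claim_equal_getsamples := by
  intro f numbers _
  unfold Spec_getsamples
  have hA0 : getsamples f numbers =
      ((PySem.List.enumerate f).foldl (pvStep (numbers.map (fun n => n * 5))) ([], [])).1 := rfl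
  have hB0 : getsamples_alt f numbers =
      (PySem.List.sorted (PySem.Set.ofList (numbers.map (fun n => n * 5))) (fun x => x)).foldl
        (fun data t =>
          if 0 ≤ t ∧ t + 3 < (f.length : Int) then
            data ++ [[pvProc (PySem.List.pyGetD f (t + 1) ""),
                      pvProc (PySem.List.pyGetD f (t + 2) ""),
                      pvProc (PySem.List.pyGetD f (t + 3) "")]]
          else data) [] := rfl
  rw [hA0, hB0]
  set nums := numbers.map (fun n => n * 5) with hnums
  have hmul : ∀ m ∈ nums, (5 : Int) ∣ m := by
    intro m hm
    rw [hnums, List.mem_map] at hm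
    obtain ⟨n, _, rfl⟩ := hm
    exact dvd_mul_left 5 n
  set S := PySem.List.sorted (PySem.Set.ofList nums) (fun x => x) with hs
  have hmem : ∀ t, t ∈ S ↔ t ∈ nums := by
    intro t
    rw [hs, PySem.List.mem_sorted, PySem.Set.mem_ofList]
  have hS : S.Pairwise (· < ·) := PySem.List.sorted_ofList_pairwise_lt nums
  -- A's fold = pvOut f nums 0
  have hA := pvA_loop f nums hmul (f.length) 0 (by omega) (by omega) [] []
      (fun hm => by obtain ⟨a, ha⟩ := hmul _ hm; omega)
      (fun hm => by obtain ⟨a, ha⟩ := hmul _ hm; omega)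
  simp only [List.drop_zero, Nat.cast_zero] at hA
  rw [hA, List.nil_append]
  -- B's fold = filter-map over S
  have hB : S.foldl
      (fun data t =>
        if 0 ≤ t ∧ t + 3 < (f.length : Int) then
          data ++ [[pvProc (PySem.List.pyGetD f (t + 1) ""),
                    pvProc (PySem.List.pyGetD f (t + 2) ""),
                    pvProc (PySem.List.pyGetD f (t + 3) "")]]
        else data) [] =
      (S.filter (fun t => decide (0 ≤ t ∧ t + 3 < (f.length : Int)))).map (pvBlkT f) := by
    have gen : ∀ (L : List Int) (acc : List (List (List String))), L.foldl
        (fun data t =>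
          if 0 ≤ t ∧ t + 3 < (f.length : Int) then
            data ++ [[pvProc (PySem.List.pyGetD f (t + 1) ""),
                      pvProc (PySem.List.pyGetD f (t + 2) ""),
                      pvProc (PySem.List.pyGetD f (t + 3) "")]]
          else data) acc =
        acc ++ (L.filter (fun t => decide (0 ≤ t ∧ t + 3 < (f.length : Int)))).map (pvBlkT f) := by
      intro L
      induction L with
      | nil => intro acc; simp
      | cons t L ihL =>
        intro acc
        rw [List.foldl_cons, ihL, List.filter_cons]
        by_cases h : 0 ≤ t ∧ t + 3 < (f.length : Int)
        · rw [if_pos h, if_pos (by simpa using h), List.map_cons]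
          simp [pvBlkT]
        · rw [if_neg h, if_neg (by simpa using h)]
    simpa using gen S []
  rw [hB]
  rw [pvOut_eq f nums S hmul hmem hS (f.length) 0 (by omega)]
  congr 1
  apply List.filter_congr
  intro t ht
  have := hmul _ ((hmem _).mp ht)
  obtain ⟨a, ha⟩ := this
  simp only [Nat.cast_zero, decide_eq_decide]
  omega
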